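-- pv_equiv track=rewrite | github.com/Geon-05/dailycoding | programmers/02_입문/day23/day23_1.py | solution
-- ===== SOURCE A (Python) =====
-- def solution(numlist, n):
--     answer = []
--     tmp_dict = {}
--     for num in numlist:
--         tmp_num = 0
--         if num - n >= 0:
--             tmp_num = num - n
--         else:
--             tmp_num = -(num - n)
--
--         if tmp_num not in tmp_dict.keys():
--             tmp_dict[tmp_num] = [num]
--         else:
--             tmp_dict[tmp_num].append(num)
--     for i in sorted(tmp_dict.keys()):
--         if len(tmp_dict[i]) > 1:
--             answer.append(max(tmp_dict[i]))
--             answer.append(min(tmp_dict[i]))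
--         else:
--             answer.append(tmp_dict[i][0])
--     return answer
-- ===== SOURCE B (Python) =====
-- def solution(numlist, n):
--     s = sorted(numlist, key=lambda x: abs(x - n))
--     answer = []
--     i = 0
--     while i < len(s):
--         j = i + 1
--         while j < len(s) and abs(s[j] - n) == abs(s[i] - n):
--             j += 1
--         if j - i > 1:
--             run = s[i:j]
--             answer.append(max(run))
--             answer.append(min(run))
--         else:
--             answer.append(s[i])
--         i = j
--     return answer
-- ===== Notes on version B (the rewrite author's own statement) =====
-- stated objective: alternative
-- what changed: B uses no dictionary at all: it stably sorts the whole list once by the key abs(x-n) and then scans it left to right, cutting it into consecutive equal-distance runs with a two-index while loop and emitting max,min (run longer than 1) or the single element per run; A instead builds a dict of per-distance group lists and iterates its sorted keys.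
import Mathlib
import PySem

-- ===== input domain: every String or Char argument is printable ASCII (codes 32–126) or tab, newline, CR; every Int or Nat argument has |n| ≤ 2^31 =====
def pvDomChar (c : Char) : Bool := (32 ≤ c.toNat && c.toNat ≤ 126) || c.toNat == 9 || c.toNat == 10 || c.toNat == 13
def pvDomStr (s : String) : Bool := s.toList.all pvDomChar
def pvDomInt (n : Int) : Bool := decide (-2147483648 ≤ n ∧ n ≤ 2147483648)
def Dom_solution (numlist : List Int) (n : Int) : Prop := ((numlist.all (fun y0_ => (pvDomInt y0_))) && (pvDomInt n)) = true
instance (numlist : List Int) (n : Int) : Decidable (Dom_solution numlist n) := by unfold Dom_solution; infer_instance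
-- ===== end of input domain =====

-- B drops A's dictionary of per-distance group lists: it sorts the list once by |x - n| and scans
-- the sorted list left to right, cutting consecutive equal-distance runs and emitting max,min
-- (run length > 1) or the single element per run — an alternative of similar cost.

-- ===== PORT A =====
-- tmp_dict[i], max(...), min(...), tmp_dict[i][0] in A's output loop can only raise on a missing key /
-- empty group, which is unreachable (i ranges over the dict's keys and every stored group is
-- nonempty); the '.getD 0' defaults below are therefore unreachable.
def solution (numlist : List Int) (n : Int) : List Int :=
  let tmp_dict : PySem.Dict Int (List Int) :=
    numlist.foldl (fun d num =>
      let tmp_num : Int := if num - n ≥ 0 then num - n else -(num - n)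
      if d.contains tmp_num = false then d.insert tmp_num [num]
      else d.insert tmp_num (d.getD tmp_num [] ++ [num])) PySem.Dict.empty
  (PySem.List.sorted tmp_dict.keys (fun k => k) false).foldl (fun answer i =>
    let g := tmp_dict.getD i []
    if g.length > 1 then
      answer ++ [(PySem.List.max? g (fun x => x)).getD 0] ++ [(PySem.List.min? g (fun x => x)).getD 0]
    else
      answer ++ [(PySem.List.pyGet? g 0).getD 0]) []

-- ===== PORT B =====
-- pvGo is Python B's outer while loop: each step the inner while / slice s[i:j] becomes
-- takeWhile/dropWhile of the same predicate; max(run)/min(run) are nonempty so getD 0 is unreachable.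
def pvGo (n : Int) : List Int → List Int
  | [] => []
  | x :: rest =>
    let run := x :: rest.takeWhile (fun y => |y - n| == |x - n|)
    (if run.length > 1 then
       [(PySem.List.max? run (fun v => v)).getD 0, (PySem.List.min? run (fun v => v)).getD 0]
     else [x]) ++ pvGo n (rest.dropWhile (fun y => |y - n| == |x - n|))
termination_by L => L.length
decreasing_by
  simpa using Nat.lt_succ_of_le (List.length_dropWhile_le _ _)

def solution_alt (numlist : List Int) (n : Int) : List Int :=
  pvGo n (PySem.List.sorted numlist (fun x => |x - n|) false)

-- ===== PRECONDITION & SPEC =====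
def Spec_solution (numlist : List Int) (n : Int) (out : List Int) : Prop := out = solution_alt numlist n
instance (numlist : List Int) (n : Int) (out : List Int) : Decidable (Spec_solution numlist n out) := by unfold Spec_solution; infer_instance

-- ===== CLAIM (what is proved, stated in full; the proofs are below) =====
def Claim_equal_solution : Prop := ∀ (numlist : List Int) (n : Int), Dom_solution numlist n → Spec_solution numlist n (solution numlist n)

-- ===== LEMMAS AND PROOFS =====

-- What both programs emit for one (nonempty) distance group g.
def pvEmit (g : List Int) : List Int :=
  if g.length > 1 then
    [(PySem.List.max? g (fun v => v)).getD 0, (PySem.List.min? g (fun v => v)).getD 0]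
  else [(PySem.List.pyGet? g 0).getD 0]

-- A's branch test 'if num - n >= 0 … else …' computes |num - n|.
theorem pv_abs_if (a : Int) : (if a ≥ 0 then a else -a) = |a| := by
  split_ifs with h
  · exact (abs_of_nonneg h).symm
  · exact (abs_of_neg (by omega)).symm

-- Both branches of A's dict-building step are 'd.modify key [] (· ++ [num])'.
theorem pv_step_eq (n : Int) :
    (fun (d : PySem.Dict Int (List Int)) (num : Int) =>
      let tmp_num : Int := if num - n ≥ 0 then num - n else -(num - n)
      if d.contains tmp_num = false then d.insert tmp_num [num]
      else d.insert tmp_num (d.getD tmp_num [] ++ [num]))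
    = (fun (d : PySem.Dict Int (List Int)) (num : Int) =>
        d.modify (|num - n|) [] (fun l => l ++ [num])) := by
  funext d num
  simp only [pv_abs_if, PySem.Dict.modify]
  by_cases h : d.contains (|num - n|)
  · simp [h]
  · simp [h, PySem.Dict.getD_of_not_contains d [] (by simpa using h)]

-- Keys of A's dict: the distinct distances in first-occurrence order.
theorem pv_dict_keys (numlist : List Int) (n : Int) :
    (numlist.foldl (fun (d : PySem.Dict Int (List Int)) num =>
        d.modify (|num - n|) [] (fun l => l ++ [num])) PySem.Dict.empty).keys
      = PySem.Set.ofList (numlist.map (fun x => |x - n|)) := by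
  rw [PySem.Dict.keys_foldl_modify_key numlist (fun num => |num - n|) []
        (fun _ num => fun l => l ++ [num]) PySem.Dict.empty]
  simp [PySem.Set.update, PySem.Set.ofList_eq_foldl, PySem.Dict.keys_empty]

-- Value of A's dict at any c: the elements at distance c, in order.
theorem pv_dict_getD (numlist : List Int) (n : Int) (c : Int) :
    (numlist.foldl (fun (d : PySem.Dict Int (List Int)) num =>
        d.modify (|num - n|) [] (fun l => l ++ [num])) PySem.Dict.empty).getD c []
      = numlist.filter (fun x => |x - n| == c) := by
  have h := PySem.Dict.getD_foldl_modify_append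
      (numlist.map (fun x => ((|x - n| : Int), x))) PySem.Dict.empty c
  rw [List.foldl_map] at h
  simpa [List.filter_map, Function.comp_def] using h

-- A's output, as one flatMap over the sorted distinct distances with the filter groups.
theorem pv_A_flat (numlist : List Int) (n : Int) :
    solution numlist n
      = (PySem.List.sorted (PySem.Set.ofList (numlist.map (fun x => |x - n|))) (fun k => k) false).flatMap
          (fun i => pvEmit (numlist.filter (fun x => |x - n| == i))) := by
  unfold solution
  simp only []
  rw [pv_step_eq, pv_dict_keys]
  rw [PySem.List.foldl_congr_mem _ _
        (fun answer i => answer ++ pvEmit (numlist.filter (fun x => |x - n| == i))) []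
        (fun acc i _ => by
          rw [pv_dict_getD]
          unfold pvEmit
          simp only []
          by_cases hc : (List.filter (fun x => |x - n| == i) numlist).length > 1
          · rw [if_pos hc, if_pos hc]; simp
          · rw [if_neg hc, if_neg hc])]
  exact PySem.List.foldl_append_eq_flatMap _ _ _

-- pvEmit only depends on the multiset of the group.
theorem pv_emit_perm (g h : List Int) (hp : g.Perm h) : pvEmit g = pvEmit h := by
  unfold pvEmit
  rw [hp.length_eq]
  by_cases hl : h.length > 1
  · rw [if_pos hl, if_pos hl]
    have hgne : g ≠ [] := by
      intro e; subst e
      have := hp.length_eq; simp at this; omega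
    have hhne : h ≠ [] := by intro e; subst e; simp at hl
    obtain ⟨m, hm⟩ := Option.ne_none_iff_exists'.mp
      (fun e => hgne ((PySem.List.max?_eq_none_iff g (fun v : Int => v)).mp e))
    obtain ⟨m', hm'⟩ := Option.ne_none_iff_exists'.mp
      (fun e => hhne ((PySem.List.max?_eq_none_iff h (fun v : Int => v)).mp e))
    obtain ⟨w, hw⟩ := Option.ne_none_iff_exists'.mp
      (fun e => hgne ((PySem.List.min?_eq_none_iff g (fun v : Int => v)).mp e))
    obtain ⟨w', hw'⟩ := Option.ne_none_iff_exists'.mp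
      (fun e => hhne ((PySem.List.min?_eq_none_iff h (fun v : Int => v)).mp e))
    have hmm : m = m' :=
      le_antisymm (PySem.List.max?_isMax hm' m (hp.mem_iff.mp (PySem.List.max?_mem hm)))
        (PySem.List.max?_isMax hm m' (hp.symm.mem_iff.mp (PySem.List.max?_mem hm')))
    have hww : w = w' :=
      le_antisymm (PySem.List.min?_isMin hw w' (hp.symm.mem_iff.mp (PySem.List.min?_mem hw')))
        (PySem.List.min?_isMin hw' w (hp.mem_iff.mp (PySem.List.min?_mem hw)))
    rw [hm, hm', hw, hw', hmm, hww]
  · rw [if_neg hl, if_neg hl]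
    have : h.length = 0 ∨ h.length = 1 := by omega
    rcases this with h0 | h1
    · obtain hh := List.length_eq_zero_iff.mp h0
      obtain hg := List.length_eq_zero_iff.mp (hp.length_eq.trans h0)
      rw [hh, hg]
    · obtain ⟨b, hb⟩ := List.length_eq_one_iff.mp h1
      subst hb
      rw [List.perm_singleton.mp hp]

-- flatMap respects pointwise equality on members.
theorem pv_flatMap_congr {α β : Type} (l : List α) (f g : α → List β)
    (h : ∀ a ∈ l, f a = g a) : l.flatMap f = l.flatMap g := by
  induction l with
  | nil => rfl
  | cons a t ih =>
    simp only [List.flatMap_cons, h a (List.mem_cons_self ..),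
      ih (fun b hb => h b (List.mem_cons_of_mem a hb))]

-- pvGo on a key-sorted list equals the flatMap over its sorted distinct keys with filter groups.
theorem pv_go_flat (n : Int) (L : List Int)
    (h : L.Pairwise (fun a b => |a - n| ≤ |b - n|)) :
    pvGo n L
      = (PySem.List.sorted (PySem.Set.ofList (L.map (fun x => |x - n|))) (fun k => k) false).flatMap
          (fun i => pvEmit (L.filter (fun x => |x - n| == i))) := by
  induction hL : L.length using Nat.strong_induction_on generalizing L with
  | _ N ih =>
    cases L with
    | nil => simp [pvGo, PySem.Set.ofList_nil]
    | cons x rest =>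
      have hpair := h
      rw [List.pairwise_cons] at hpair
      obtain ⟨hx, hrest⟩ := hpair
      set p : Int → Bool := fun y => |y - n| == |x - n| with hp
      have hsplit : rest = rest.takeWhile p ++ rest.dropWhile p :=
        (List.takeWhile_append_dropWhile).symm
      -- every element of the run has key |x - n|
      have hrun : ∀ y ∈ x :: rest.takeWhile p, |y - n| = |x - n| := by
        intro y hy
        rcases List.mem_cons.mp hy with hy | hy
        · rw [hy]
        · simpa [hp] using List.mem_takeWhile_imp hy
      -- every element of the tail has key strictly greater than |x - n|
      have htail : ∀ y ∈ rest.dropWhile p, |x - n| < |y - n| := by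
        intro y hy
        cases hd : rest.dropWhile p with
        | nil => rw [hd] at hy; simp at hy
        | cons z zs =>
          have hznot : ¬ p z := by
            have := List.head?_dropWhile_not p rest
            rw [hd] at this
            simpa using this
          have hzrest : z ∈ rest := by
            have : z ∈ rest.dropWhile p := by rw [hd]; simp
            exact (List.dropWhile_sublist p).subset this
          have hzgt : |x - n| < |z - n| := by
            have hle := hx z hzrest
            have : |z - n| ≠ |x - n| := by simpa [hp] using hznot
            omega
          rw [hd] at hy
          rcases List.mem_cons.mp hy with hy | hy
          · rw [hy]; exact hzgt
          · have hpair' : (rest.dropWhile p).Pairwise (fun a b => |a - n| ≤ |b - n|) :=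
              hrest.sublist (List.dropWhile_sublist p)
            rw [hd] at hpair'
            rw [List.pairwise_cons] at hpair'
            exact lt_of_lt_of_le hzgt (hpair'.1 y hy)
      -- the run is exactly the filter at |x - n|
      have hfilter_run : (x :: rest).filter (fun y => |y - n| == |x - n|) = x :: rest.takeWhile p := by
        rw [List.filter_cons_of_pos (by simp)]
        congr 1
        conv_lhs => rw [hsplit]
        rw [List.filter_append]
        rw [List.filter_eq_self.mpr (fun y hy => by
          simpa [hp] using List.mem_takeWhile_imp hy)]
        rw [List.filter_eq_nil_iff.mpr (fun y hy => by
          have := htail y hy; simp; omega)]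
        rw [List.append_nil]
      -- the filter at any other key ignores the run
      have hfilter_other : ∀ k : Int, k ≠ |x - n| →
          (x :: rest).filter (fun y => |y - n| == k)
            = (rest.dropWhile p).filter (fun y => |y - n| == k) := by
        intro k hk
        rw [List.filter_cons_of_neg (by simp only [beq_iff_eq]; omega)]
        conv_lhs => rw [hsplit]
        rw [List.filter_append]
        rw [List.filter_eq_nil_iff.mpr (fun y hy => by
          have := List.mem_takeWhile_imp hy
          simp [hp] at this ⊢
          omega)]
        rw [List.nil_append]
      -- the sorted distinct keys split as  |x-n| :: (sorted distinct keys of the tail)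
      have hkeys :
          PySem.List.sorted (PySem.Set.ofList ((x :: rest).map (fun y => |y - n|))) (fun k => k) false
            = |x - n| ::
              PySem.List.sorted (PySem.Set.ofList ((rest.dropWhile p).map (fun y => |y - n|))) (fun k => k) false := by
        apply PySem.List.sorted_id_eq_of_perm_of_pairwise
        · apply (List.perm_ext_iff_of_nodup _ (PySem.Set.nodup_ofList _)).mpr
          · intro k
            simp only [List.mem_cons, PySem.Set.mem_ofList, PySem.List.mem_sorted, List.mem_map]
            constructor
            · rintro (hk | ⟨y, hy, hyk⟩)
              · exact ⟨x, by simp, by omega⟩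
              · exact ⟨y, Or.inr ((List.dropWhile_sublist p).subset hy), hyk⟩
            · rintro ⟨y, hy, hyk⟩
              rcases hy with hy | hy
              · left; subst hy; omega
              · by_cases hky : |y - n| = |x - n|
                · left; omega
                · right
                  refine ⟨y, ?_, hyk⟩
                  conv at hy => rw [hsplit]
                  rcases List.mem_append.mp hy with hy | hy
                  · exact absurd (by simpa [hp] using List.mem_takeWhile_imp hy) hky
                  · exact hy
          · rw [List.nodup_cons]
            constructor
            · intro hk
              rw [PySem.List.mem_sorted, PySem.Set.mem_ofList] at hk
              obtain ⟨y, hy, hyk⟩ := List.mem_map.mp hk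
              have := htail y hy
              omega
            · exact (PySem.List.sorted_perm _ _ _).nodup_iff.mpr (PySem.Set.nodup_ofList _)
        · rw [List.pairwise_cons]
          constructor
          · intro k hk
            rw [PySem.List.mem_sorted, PySem.Set.mem_ofList] at hk
            obtain ⟨y, hy, hyk⟩ := List.mem_map.mp hk
            have := htail y hy
            omega
          · have := PySem.List.sorted_ofList_pairwise_lt
              ((rest.dropWhile p).map (fun y => |y - n|))
            exact this.imp (fun hab => le_of_lt hab)
      -- assemble
      rw [pvGo, hkeys, List.flatMap_cons]
      congr 1
      · rw [hfilter_run]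
        unfold pvEmit
        split_ifs with hlen
        · rfl
        · simp [PySem.List.pyGet?, PySem.List.pyIdx?]
      · rw [ih (rest.dropWhile p).length
            (by rw [← hL]; simpa using Nat.lt_succ_of_le (List.length_dropWhile_le _ _))
            (rest.dropWhile p) (hrest.sublist (List.dropWhile_sublist p)) rfl]
        apply pv_flatMap_congr
        intro k hk
        rw [PySem.List.mem_sorted, PySem.Set.mem_ofList] at hk
        obtain ⟨y, hy, hyk⟩ := List.mem_map.mp hk
        have := htail y hy
        rw [hfilter_other k (by omega)]

theorem solution_eq_alt (numlist : List Int) (n : Int) :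
    solution numlist n = solution_alt numlist n := by
  unfold solution_alt
  set L := PySem.List.sorted numlist (fun x => |x - n|) false with hLdef
  have hperm : L.Perm numlist := PySem.List.sorted_perm _ _ _
  rw [pv_go_flat n L (PySem.List.sorted_pairwise _ _), pv_A_flat]
  -- same sorted distinct keys on both sides
  have hkeys : PySem.List.sorted (PySem.Set.ofList (numlist.map (fun x => |x - n|))) (fun k => k) false
      = PySem.List.sorted (PySem.Set.ofList (L.map (fun x => |x - n|))) (fun k => k) false := by
    apply PySem.List.sorted_eq_sorted_of_perm _ _ _ (fun a b hab => hab)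
    apply (List.perm_ext_iff_of_nodup (PySem.Set.nodup_ofList _) (PySem.Set.nodup_ofList _)).mpr
    intro k
    simp only [PySem.Set.mem_ofList, List.mem_map]
    exact ⟨fun ⟨y, hy, hk⟩ => ⟨y, hperm.symm.mem_iff.mp hy, hk⟩,
           fun ⟨y, hy, hk⟩ => ⟨y, hperm.mem_iff.mp hy, hk⟩⟩
  rw [hkeys]
  apply pv_flatMap_congr
  intro k _
  exact pv_emit_perm _ _ ((hperm.filter _).symm)

-- ===== VERDICT (by name: the statement is the Claim_ definition above) =====
theorem solution_spec : Claim_equal_solution := by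
  intro numlist n _
  exact solution_eq_alt numlist n
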